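-- pv_equiv track=rewrite | github.com/mamikula/Introduction-to-Computer-Science | Z07/Z07P16.py | fives
-- ===== SOURCE A (Python) =====
-- def fives(num):
--     counter = 0
--     while num > 0:
--         if num % 8 == 5:
--             counter += 1
--         num //= 8
--
--     if counter % 2 == 0 and counter != 0:
--         return True
--     return False
-- ===== SOURCE B (Python) =====
-- def fives(num):
--     if num <= 0:
--         return False
--     counter = sum(ch == '5' for ch in oct(num))
--     return counter % 2 == 0 and counter != 0
-- ===== Notes on version B (the rewrite author's own statement) =====
-- stated objective: simpler
-- what changed: Replaces the arithmetic digit-extraction while-loop with building the octal string via oct() and counting its '5' characters in one pass.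
import Mathlib
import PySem

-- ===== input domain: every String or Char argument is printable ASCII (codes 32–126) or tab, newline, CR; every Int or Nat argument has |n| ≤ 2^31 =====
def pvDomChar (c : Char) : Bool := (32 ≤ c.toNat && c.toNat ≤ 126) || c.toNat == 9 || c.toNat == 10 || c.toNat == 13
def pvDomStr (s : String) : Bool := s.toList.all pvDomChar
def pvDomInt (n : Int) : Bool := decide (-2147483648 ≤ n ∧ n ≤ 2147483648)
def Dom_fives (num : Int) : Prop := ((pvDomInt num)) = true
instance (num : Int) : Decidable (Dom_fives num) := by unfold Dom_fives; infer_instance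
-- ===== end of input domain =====

-- B replaces A's arithmetic digit-extraction loop by building the octal string (oct) and counting its '5' characters; return value only, no side effects.

-- termination helper for both ports' div-by-8 recursions
theorem pvFdiv8_lt (n : Int) (h : 0 < n) : (PySem.Int.floordiv n 8).toNat < n.toNat := by
  rw [PySem.Int.floordiv_eq_ediv_of_pos (by norm_num)]
  omega

-- ===== PORT A =====
-- while num > 0: if num % 8 == 5: counter += 1; num //= 8
def fivesLoop (num counter : Int) : Int :=
  if h : 0 < num then
    fivesLoop (PySem.Int.floordiv num 8)
      (if PySem.Int.mod num 8 == 5 then counter + 1 else counter)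
  else counter
termination_by num.toNat
decreasing_by exact pvFdiv8_lt num h

def fives (num : Int) : Bool :=
  let counter := fivesLoop num 0
  if PySem.Int.mod counter 2 == 0 && counter != 0 then true else false

-- ===== PORT B =====
-- oct(n) = "0o" followed by the octal digits of n (n > 0), built by hand here (exact for n > 0)
def octDigits (n : Int) : List Char :=
  if h : 0 < n then
    octDigits (PySem.Int.floordiv n 8) ++ [Char.ofNat (48 + (PySem.Int.mod n 8).toNat)]
  else []
termination_by n.toNat
decreasing_by exact pvFdiv8_lt n h

def fives_alt (num : Int) : Bool :=
  if num ≤ 0 then false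
  else
    let counter : Int := ((['0', 'o'] ++ octDigits num).countP (fun ch => ch == '5') : Nat)
    PySem.Int.mod counter 2 == 0 && counter != 0

-- ===== PRECONDITION & SPEC =====
def Spec_fives (num : Int) (out : Bool) : Prop := out = fives_alt num
instance (num : Int) (out : Bool) : Decidable (Spec_fives num out) := by unfold Spec_fives; infer_instance

-- ===== CLAIM (what is proved, stated in full; the proofs are below) =====
def Claim_equal_fives : Prop := ∀ (num : Int), Dom_fives num → Spec_fives num (fives num)

-- ===== LEMMAS AND PROOFS =====

theorem fivesLoop_eq_count (n : Int) (c : Int) :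
    fivesLoop n c = c + ((octDigits n).countP (fun ch => ch == '5') : Nat) := by
  by_cases h : 0 < n
  · rw [fivesLoop, octDigits, dif_pos h, dif_pos h,
      fivesLoop_eq_count (PySem.Int.floordiv n 8)]
    have hm : PySem.Int.mod n 8 = n % 8 := PySem.Int.mod_eq_emod_of_pos (by norm_num)
    have hb0 : 0 ≤ n % 8 := Int.emod_nonneg n (by norm_num)
    have hb1 : n % 8 < 8 := Int.emod_lt_of_pos n (by norm_num)
    rw [List.countP_append]
    by_cases h5 : n % 8 = 5
    · have hch : (Char.ofNat (48 + (n % 8).toNat) == '5') = true := by rw [h5]; decide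
      simp [h5]
      omega
    · have hch : (Char.ofNat (48 + (n % 8).toNat) == '5') = false := by
        have hlt : (n % 8).toNat < 8 := by omega
        have hne : (n % 8).toNat ≠ 5 := by omega
        interval_cases hv : (n % 8).toNat <;> first | decide | omega
      simp [h5, hch]
  · rw [fivesLoop, octDigits, dif_neg h, dif_neg h]
    simp
termination_by n.toNat
decreasing_by exact pvFdiv8_lt n h

-- counting '5' in "0o" + digits counts only the digits
theorem countP_prefix (num : Int) :
    (['0', 'o'] ++ octDigits num).countP (fun ch => ch == '5')
      = (octDigits num).countP (fun ch => ch == '5') := by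
  simp [List.countP_cons]

-- ===== VERDICT (by name: the statement is the Claim_ definition above) =====
theorem fives_spec : Claim_equal_fives := by
  intro num _
  unfold Spec_fives fives fives_alt
  rw [fivesLoop_eq_count, zero_add]
  by_cases h : num ≤ 0
  · have hn : ¬ 0 < num := by omega
    rw [octDigits, dif_neg hn, if_pos h]
    decide
  · have hIf : ∀ b : Bool, (if b = true then true else false) = b := by decide
    rw [if_neg h, countP_prefix, hIf]
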